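-- pv_equiv track=rewrite | github.com/david-hoze/scientific-writing | circuit-presheaf/scripts/n5_scan.py | sample_majority_variants
-- ===== SOURCE A (Python) =====
-- def sample_majority_variants(n=5):
--     """MAJ variants: majority, weighted majority, etc."""
--     results = []
--     # Standard MAJ5
--     tt = 0
--     for i in range(1 << n):
--         if bin(i).count('1') >= 3:
--             tt |= (1 << i)
--     results.append(('MAJ5', tt))
--
--     # Negated MAJ5
--     results.append(('NEG_MAJ5', ((1 << (1 << n)) - 1) ^ tt))
--
--     return results
-- ===== SOURCE B (Python) =====
-- def sample_majority_variants(n=5):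
--     """MAJ variants: majority, weighted majority, etc."""
--     # m[t] = bitmask of all i < 2**k with popcount(i) >= t, built by doubling
--     # via the Shannon expansion: high half adds one set bit to every index.
--     m = [1, 0, 0, 0]
--     for k in range(n):
--         s = 1 << k
--         m = [m[0] | (m[0] << s),
--              m[1] | (m[0] << s),
--              m[2] | (m[1] << s),
--              m[3] | (m[2] << s)]
--     tt = m[3]
--     full = (1 << (1 << n)) - 1
--     return [('MAJ5', tt), ('NEG_MAJ5', full ^ tt)]
-- ===== Notes on version B (the rewrite author's own statement) =====
-- stated objective: alternative
-- what changed: Replaces the exhaustive scan that popcount-tests every truth-table index by a Shannon-expansion doubling recurrence keeping one mask per popcount threshold and doubling the table once per variable; intended as faster (a linear number of bigint shift/or operations instead of an exponential loop), though a timing run could not confirm a clean reading at its largest sizes.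
import Mathlib
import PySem

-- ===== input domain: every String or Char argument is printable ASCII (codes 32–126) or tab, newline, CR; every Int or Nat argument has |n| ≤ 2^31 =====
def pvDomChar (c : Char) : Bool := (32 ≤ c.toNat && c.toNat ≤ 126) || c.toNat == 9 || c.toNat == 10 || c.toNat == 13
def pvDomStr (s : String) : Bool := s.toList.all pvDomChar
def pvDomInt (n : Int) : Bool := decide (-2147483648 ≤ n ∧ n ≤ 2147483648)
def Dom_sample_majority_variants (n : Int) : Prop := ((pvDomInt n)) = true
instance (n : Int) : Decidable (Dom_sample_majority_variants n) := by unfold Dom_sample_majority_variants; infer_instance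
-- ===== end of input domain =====

-- B builds the truth table by a Shannon-expansion doubling recurrence over threshold
-- masks instead of A's per-index popcount scan (alternative algorithm).


-- ===== PORT A =====
-- bin(i).count('1') for i ≥ 0 (every i in the loop is ≥ 0): hand port, exact there
def pyCountOnes (i : Nat) : Nat :=
  if i = 0 then 0 else i % 2 + pyCountOnes (i / 2)
decreasing_by exact Nat.div_lt_self (Nat.pos_of_ne_zero (by assumption)) (by norm_num)

def sample_majority_variants (n : Int) : List (String × Int) :=
  -- tt kept as Nat: every intermediate value in A is nonnegative, so this is exact
  let tt : Nat :=
    (PySem.List.pyRange 0 ((1 <<< n.toNat : Nat) : Int) 1).foldl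
      (fun tt i => if 3 ≤ pyCountOnes i.toNat then tt ||| (1 <<< i.toNat) else tt) 0
  [("MAJ5", (tt : Int)),
   ("NEG_MAJ5", ((((1 <<< (1 <<< n.toNat) : Nat) - 1) ^^^ tt : Nat) : Int))]

-- ===== PORT B =====
def sample_majority_variants_alt (n : Int) : List (String × Int) :=
  -- m = (m0,m1,m2,m3): the four threshold masks; loop over range(n)
  let m : Nat × Nat × Nat × Nat :=
    (PySem.List.pyRange 0 n 1).foldl
      (fun m k =>
        let s : Nat := 1 <<< k.toNat
        (m.1 ||| (m.1 <<< s), m.2.1 ||| (m.1 <<< s),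
         m.2.2.1 ||| (m.2.1 <<< s), m.2.2.2 ||| (m.2.2.1 <<< s)))
      (1, 0, 0, 0)
  let tt : Nat := m.2.2.2
  let full : Nat := (1 <<< (1 <<< n.toNat) : Nat) - 1
  [("MAJ5", (tt : Int)), ("NEG_MAJ5", ((full ^^^ tt : Nat) : Int))]

-- ===== PRECONDITION & SPEC =====
-- both A and B raise ValueError (negative shift count) when n is negative
def Pre_sample_majority_variants (n : Int) : Prop := 0 ≤ n
instance (n : Int) : Decidable (Pre_sample_majority_variants n) := by unfold Pre_sample_majority_variants; infer_instance
def pvWitness_sample_majority_variants : Int := (3)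

def Spec_sample_majority_variants (n : Int) (out : List (String × Int)) : Prop := out = sample_majority_variants_alt n
instance (n : Int) (out : List (String × Int)) : Decidable (Spec_sample_majority_variants n out) := by unfold Spec_sample_majority_variants; infer_instance

-- ===== CLAIM (what is proved, stated in full; the proofs are below) =====
def Claim_equal_sample_majority_variants : Prop := ∀ (n : Int), Dom_sample_majority_variants n → Pre_sample_majority_variants n → Spec_sample_majority_variants n (sample_majority_variants n)

-- ===== LEMMAS AND PROOFS =====

theorem pc_unfold (j : Nat) : pyCountOnes j = j % 2 + pyCountOnes (j / 2) := by
  rw [pyCountOnes]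
  split
  · subst j; simp [pyCountOnes]
  · rfl

theorem pc_two_pow_add (c : Nat) : ∀ j, j < 2 ^ c → pyCountOnes (2 ^ c + j) = pyCountOnes j + 1 := by
  induction c with
  | zero =>
    intro j hj
    interval_cases j
    simp [pyCountOnes]
  | succ c ih =>
    intro j hj
    rw [pc_unfold (2 ^ (c + 1) + j), pc_unfold j]
    have h2 : (2 ^ (c + 1) + j) % 2 = j % 2 := by omega
    have h3 : (2 ^ (c + 1) + j) / 2 = 2 ^ c + j / 2 := by omega
    have h4 : j / 2 < 2 ^ c := by
      have := Nat.pow_succ 2 c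
      omega
    rw [h2, h3, ih _ h4]
    omega

/-- `x` is the bitmask of all `j < 2^c` whose popcount is at least `t`. -/
def GoodMask (c t x : Nat) : Prop := ∀ j, x.testBit j = true ↔ (j < 2 ^ c ∧ t ≤ pyCountOnes j)

theorem goodMask_step {c t t' x y : Nat} (hx : GoodMask c t x) (hy : GoodMask c t' y)
    (ht : t' = t - 1) : GoodMask (c + 1) t (x ||| (y <<< (1 <<< c))) := by
  intro j
  have hs : (1 <<< c : Nat) = 2 ^ c := by simp [Nat.shiftLeft_eq]
  rw [Nat.testBit_or, Nat.testBit_shiftLeft, hs]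
  simp only [Bool.or_eq_true, Bool.and_eq_true, decide_eq_true_eq]
  constructor
  · rintro (h | ⟨hle, h⟩)
    · rcases (hx j).1 h with ⟨hj, hpc⟩
      refine ⟨by calc j < 2 ^ c := hj
                    _ ≤ 2 ^ (c + 1) := Nat.pow_le_pow_right (by norm_num) (by omega), hpc⟩
    · rcases (hy _).1 h with ⟨hj, hpc⟩
      have hjeq : j = 2 ^ c + (j - 2 ^ c) := by omega
      have hpceq : pyCountOnes j = pyCountOnes (j - 2 ^ c) + 1 := by
        conv_lhs => rw [hjeq]
        exact pc_two_pow_add c (j - 2 ^ c) hj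
      have := Nat.pow_succ 2 c
      omega
  · rintro ⟨hj, hpc⟩
    by_cases hlow : j < 2 ^ c
    · exact Or.inl ((hx j).2 ⟨hlow, hpc⟩)
    · right
      have hle : 2 ^ c ≤ j := by omega
      refine ⟨hle, (hy _).2 ⟨?_, ?_⟩⟩
      · have := Nat.pow_succ 2 c; omega
      · have hjeq : j = 2 ^ c + (j - 2 ^ c) := by omega
        have hlt : j - 2 ^ c < 2 ^ c := by have := Nat.pow_succ 2 c; omega
        have hpc' := pc_two_pow_add c (j - 2 ^ c) hlt
        rw [hjeq] at hpc
        omega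

/-- Nat-level step of B's loop. -/
def stepB (m : Nat × Nat × Nat × Nat) (c : Nat) : Nat × Nat × Nat × Nat :=
  let s : Nat := 1 <<< c
  (m.1 ||| (m.1 <<< s), m.2.1 ||| (m.1 <<< s), m.2.2.1 ||| (m.2.1 <<< s), m.2.2.2 ||| (m.2.2.1 <<< s))

theorem B_inv (c : Nat) :
    GoodMask c 0 ((List.range c).foldl stepB (1, 0, 0, 0)).1 ∧
    GoodMask c 1 ((List.range c).foldl stepB (1, 0, 0, 0)).2.1 ∧
    GoodMask c 2 ((List.range c).foldl stepB (1, 0, 0, 0)).2.2.1 ∧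
    GoodMask c 3 ((List.range c).foldl stepB (1, 0, 0, 0)).2.2.2 := by
  induction c with
  | zero =>
    simp only [List.range_zero, List.foldl_nil]
    have pc0 : pyCountOnes 0 = 0 := by simp [pyCountOnes]
    have haux : ∀ t, 1 ≤ t → GoodMask 0 t 0 := by
      intro t ht j
      simp only [Nat.zero_testBit, Bool.false_eq_true, false_iff]
      rintro ⟨hj, hpc⟩
      have hj0 : j = 0 := by
        have : (2 : Nat) ^ 0 = 1 := pow_zero 2
        omega
      rw [hj0, pc0] at hpc
      omega
    refine ⟨?_, haux 1 (by omega), haux 2 (by omega), haux 3 (by omega)⟩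
    intro j
    rw [show (1 : Nat) = 2 ^ 0 from rfl, Nat.testBit_two_pow]
    simp only [decide_eq_true_eq, pow_zero]
    constructor
    · rintro rfl
      exact ⟨by omega, Nat.zero_le _⟩
    · rintro ⟨hj, _⟩
      omega
  | succ c ih =>
    rw [List.range_succ, List.foldl_append]
    obtain ⟨h0, h1, h2, h3⟩ := ih
    simp only [List.foldl_cons, List.foldl_nil]
    exact ⟨goodMask_step h0 h0 rfl, goodMask_step h1 h0 rfl,
      goodMask_step h2 h1 rfl, goodMask_step h3 h2 rfl⟩

/-- Nat-level step of A's loop. -/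
def stepA (tt i : Nat) : Nat := if 3 ≤ pyCountOnes i then tt ||| (1 <<< i) else tt

theorem A_fold (m : Nat) : ∀ (acc j : Nat),
    ((List.range m).foldl stepA acc).testBit j = true ↔
      (acc.testBit j = true ∨ (j < m ∧ 3 ≤ pyCountOnes j)) := by
  induction m with
  | zero => intro acc j; simp
  | succ m ih =>
    intro acc j
    rw [List.range_succ, List.foldl_append]
    simp only [List.foldl_cons, List.foldl_nil, stepA]
    split
    · rename_i hm
      rw [Nat.testBit_or, Nat.shiftLeft_eq, one_mul, Nat.testBit_two_pow]
      simp only [Bool.or_eq_true, decide_eq_true_eq]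
      rw [ih]
      constructor
      · rintro ((h | ⟨h1, h2⟩) | rfl)
        · exact Or.inl h
        · exact Or.inr ⟨by omega, h2⟩
        · exact Or.inr ⟨by omega, hm⟩
      · rintro (h | ⟨h1, h2⟩)
        · exact Or.inl (Or.inl h)
        · by_cases hjm : j = m
          · exact Or.inr hjm.symm
          · exact Or.inl (Or.inr ⟨by omega, h2⟩)
    · rename_i hm
      rw [ih]
      constructor
      · rintro (h | ⟨h1, h2⟩)
        · exact Or.inl h
        · exact Or.inr ⟨by omega, h2⟩
      · rintro (h | ⟨h1, h2⟩)
        · exact Or.inl h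
        · refine Or.inr ⟨?_, h2⟩
          by_cases hjm : j = m
          · exact absurd (hjm ▸ h2) hm
          · omega

-- ===== VERDICT (by name: the statement is the Claim_ definition above) =====
theorem sample_majority_variants_spec : Claim_equal_sample_majority_variants := by
  intro n _ hpre
  unfold Spec_sample_majority_variants sample_majority_variants sample_majority_variants_alt
  have hA : (PySem.List.pyRange 0 ((1 <<< n.toNat : Nat) : Int) 1).foldl
      (fun tt i => if 3 ≤ pyCountOnes i.toNat then tt ||| (1 <<< i.toNat) else tt) 0
      = (List.range (2 ^ n.toNat)).foldl stepA 0 := by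
    rw [PySem.List.pyRange_one, List.foldl_map]
    have e1 : (((1 <<< n.toNat : Nat) : Int) - 0).toNat = 2 ^ n.toNat := by
      rw [Int.sub_zero, Int.toNat_natCast, Nat.shiftLeft_eq, one_mul]
    rw [e1]
    simp only [zero_add, Int.toNat_natCast]
    rfl
  have hB : (PySem.List.pyRange 0 n 1).foldl
      (fun (m : Nat × Nat × Nat × Nat) (k : Int) =>
        let s : Nat := 1 <<< k.toNat
        (m.1 ||| (m.1 <<< s), m.2.1 ||| (m.1 <<< s),
         m.2.2.1 ||| (m.2.1 <<< s), m.2.2.2 ||| (m.2.2.1 <<< s)))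
      (1, 0, 0, 0)
      = (List.range n.toNat).foldl stepB (1, 0, 0, 0) := by
    rw [PySem.List.pyRange_one, List.foldl_map]
    rw [Int.sub_zero]
    simp only [zero_add, Int.toNat_natCast]
    rfl
  simp only [hA, hB]
  have htt : (List.range (2 ^ n.toNat)).foldl stepA 0
      = ((List.range n.toNat).foldl stepB (1, 0, 0, 0)).2.2.2 := by
    apply Nat.eq_of_testBit_eq
    intro j
    have ha := A_fold (2 ^ n.toNat) 0 j
    have hb := (B_inv n.toNat).2.2.2 j
    simp only [Nat.zero_testBit, Bool.false_eq_true, false_or] at ha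
    by_cases h : j < 2 ^ n.toNat ∧ 3 ≤ pyCountOnes j
    · rw [ha.2 h, hb.2 h]
    · have g1 : ((List.range (2 ^ n.toNat)).foldl stepA 0).testBit j = false := by
        simpa using mt ha.1 h
      have g2 : (((List.range n.toNat).foldl stepB (1, 0, 0, 0)).2.2.2).testBit j = false := by
        simpa using mt hb.1 h
      rw [g1, g2]
  rw [htt]
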